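-- pv_equiv track=rewrite | github.com/leesunyong/BaekJoon | 1~10000/1654/solution.py | solution
-- ===== SOURCE A (Python) =====
-- def solution(K, N, cables):
--     maxLength = max(cables)
--
--     right, left = maxLength, 1
--     answer = 0
--     while True:
--         cnt = 0
--         current = (right + left) // 2
--
--         for c in cables:
--             cnt += c // current
--
--         if cnt < N:
--             right = current - 1
--         elif cnt >= N:
--             answer = current
--             left = current + 1
--
--         if right < left: return answer
-- ===== SOURCE B (Python) =====
-- def solution(K, N, cables):
--     def go(lo, hi):
--         if hi < lo:
--             return lo - 1
--         mid = lo + (hi - lo) // 2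
--         if sum(c // mid for c in cables) >= N:
--             return go(mid + 1, hi)
--         return go(lo, mid - 1)
--     return go(1, max(cables))
-- ===== Notes on version B (the rewrite author's own statement) =====
-- stated objective: simpler
-- what changed: The while-True loop with post-hoc termination test and three mutable state variables (right, left, answer) is replaced by an accumulator-free recursive bisection: it pre-tests interval emptiness, computes the midpoint as lo + (hi - lo) // 2, counts pieces with a single sum() generator instead of an explicit accumulation loop, and reads the answer off as lo - 1 instead of threading an answer variable.
-- intended difference: When every cable length is <= -2 (so max(cables) <= -2) and the quotient sum at A's negative first midpoint (1+max)//2 still reaches N, A returns that negative midpoint as a 'cut length'; B returns 0, the intended answer since no positive length can produce N pieces. — e.g. on solution(0, 1, [-4]): A returns -2, B returns 0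
import Mathlib
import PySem

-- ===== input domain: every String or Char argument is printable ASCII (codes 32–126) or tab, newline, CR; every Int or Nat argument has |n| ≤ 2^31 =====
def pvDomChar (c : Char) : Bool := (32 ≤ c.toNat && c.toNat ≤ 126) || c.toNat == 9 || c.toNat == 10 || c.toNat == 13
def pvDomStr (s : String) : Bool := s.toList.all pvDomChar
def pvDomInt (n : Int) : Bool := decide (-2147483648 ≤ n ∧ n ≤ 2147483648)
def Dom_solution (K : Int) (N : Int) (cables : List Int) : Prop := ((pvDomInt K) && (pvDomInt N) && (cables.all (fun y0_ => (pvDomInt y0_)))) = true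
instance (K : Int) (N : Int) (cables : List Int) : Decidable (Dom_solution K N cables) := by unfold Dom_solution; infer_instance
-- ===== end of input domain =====

-- B replaces A's while-True/post-test loop with three mutable variables by an accumulator-free
-- recursive bisection (pre-test, midpoint lo + (hi-lo)//2, sum() of quotients, answer read off
-- as lo - 1): same bisection path, simpler decomposition ("simpler"; not faster).

-- ===== PORT A =====
-- termination facts for the two ports' loops (cited by name in decreasing_by)
lemma pvLoopA_dec1 (right left : Int)
    (h : ¬ PySem.Int.floordiv (right + left) 2 - 1 < left) :
    (PySem.Int.floordiv (right + left) 2 - 1 - left).toNat < (right - left).toNat := by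
  have h2 : PySem.Int.floordiv (right + left) 2 = (right + left) / 2 :=
    PySem.Int.floordiv_eq_ediv_of_pos (by norm_num)
  omega

lemma pvLoopA_dec2 (right left : Int)
    (h : ¬ right < PySem.Int.floordiv (right + left) 2 + 1) :
    (right - (PySem.Int.floordiv (right + left) 2 + 1)).toNat < (right - left).toNat := by
  have h2 : PySem.Int.floordiv (right + left) 2 = (right + left) / 2 :=
    PySem.Int.floordiv_eq_ediv_of_pos (by norm_num)
  omega

lemma pvGoB_dec1 (lo hi : Int) (h : ¬ hi < lo) :
    (hi - (lo + PySem.Int.floordiv (hi - lo) 2 + 1) + 1).toNat < (hi - lo + 1).toNat := by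
  have h2 : PySem.Int.floordiv (hi - lo) 2 = (hi - lo) / 2 :=
    PySem.Int.floordiv_eq_ediv_of_pos (by norm_num)
  omega

lemma pvGoB_dec2 (lo hi : Int) (h : ¬ hi < lo) :
    (lo + PySem.Int.floordiv (hi - lo) 2 - 1 - lo + 1).toNat < (hi - lo + 1).toNat := by
  have h2 : PySem.Int.floordiv (hi - lo) 2 = (hi - lo) / 2 :=
    PySem.Int.floordiv_eq_ediv_of_pos (by norm_num)
  omega

-- while True: current=(right+left)//2; cnt=sum-loop; branch; return answer when right<left
def pvLoopA (N : Int) (cables : List Int) (right left answer : Int) : Int :=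
  let current := PySem.Int.floordiv (right + left) 2
  let cnt := cables.foldl (fun s c => s + PySem.Int.floordiv c current) 0
  if cnt < N then
    if current - 1 < left then answer
    else pvLoopA N cables (current - 1) left answer
  else
    if right < current + 1 then current
    else pvLoopA N cables right (current + 1) current
termination_by (right - left).toNat
decreasing_by
  · exact pvLoopA_dec1 right left (by assumption)
  · exact pvLoopA_dec2 right left (by assumption)

def solution (K : Int) (N : Int) (cables : List Int) : Int :=
  pvLoopA N cables ((PySem.List.max? cables (fun x => x)).getD 0) 1 0

-- ===== PORT B =====
-- def go(lo, hi): pre-test emptiness, mid = lo + (hi-lo)//2, sum(c // mid ...), answer = lo-1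
def pvGoB (N : Int) (cables : List Int) (lo hi : Int) : Int :=
  if hi < lo then lo - 1
  else
    let mid := lo + PySem.Int.floordiv (hi - lo) 2
    if N ≤ (cables.map (fun c => PySem.Int.floordiv c mid)).sum then
      pvGoB N cables (mid + 1) hi
    else
      pvGoB N cables lo (mid - 1)
termination_by (hi - lo + 1).toNat
decreasing_by
  · exact pvGoB_dec1 lo hi (by assumption)
  · exact pvGoB_dec2 lo hi (by assumption)

def solution_alt (K : Int) (N : Int) (cables : List Int) : Int :=
  pvGoB N cables 1 ((PySem.List.max? cables (fun x => x)).getD 0)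

-- ===== PRECONDITION & SPEC =====
-- Pre_ excludes exactly the inputs where Python A raises: empty cables (ValueError from max)
-- and max(cables) ∈ {0, -1} (first midpoint 0 → ZeroDivisionError).
def Pre_solution (K : Int) (N : Int) (cables : List Int) : Prop :=
  cables ≠ [] ∧ (PySem.List.max? cables (fun x => x)).getD 0 ≠ 0 ∧
    (PySem.List.max? cables (fun x => x)).getD 0 ≠ -1
instance (K : Int) (N : Int) (cables : List Int) : Decidable (Pre_solution K N cables) := by
  unfold Pre_solution; infer_instance

def pvWitness_solution : Int × Int × List Int := (0, 2, [5, 3])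

-- When every cable length is ≤ -2 (so max ≤ -2) and the quotient sum at A's negative first
-- midpoint (1+max)//2 still reaches N, A returns that negative midpoint as a 'cut length';
-- B returns 0, the intended answer since no positive length can produce N pieces.
def D_solution (K : Int) (N : Int) (cables : List Int) : Prop :=
  cables.max?.getD 0 ≤ -2 ∧
    N ≤ cables.foldr (fun c t => Int.fdiv c (Int.fdiv (1 + cables.max?.getD 0) 2) + t) 0
instance (K : Int) (N : Int) (cables : List Int) : Decidable (D_solution K N cables) := by
  unfold D_solution; infer_instance

def Spec_solution (K : Int) (N : Int) (cables : List Int) (out : Int) : Prop :=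
  ¬ D_solution K N cables → out = solution_alt K N cables
instance (K : Int) (N : Int) (cables : List Int) (out : Int) : Decidable (Spec_solution K N cables out) := by
  unfold Spec_solution; infer_instance

def pvDiffWitness_solution : Int × Int × List Int := (0, 1, [-4])
def pvDiffWitnessOut_solution : Int × Int := (-2, 0)

-- ===== CLAIM (what is proved, stated in full; the proofs are below) =====
def Claim_unchanged_solution : Prop := ∀ (K : Int) (N : Int) (cables : List Int), Dom_solution K N cables → Pre_solution K N cables → Spec_solution K N cables (solution K N cables)
def Claim_changed_solution : Prop := Dom_solution (pvDiffWitness_solution.1) (pvDiffWitness_solution.2.1) (pvDiffWitness_solution.2.2) ∧ Pre_solution (pvDiffWitness_solution.1) (pvDiffWitness_solution.2.1) (pvDiffWitness_solution.2.2) ∧ D_solution (pvDiffWitness_solution.1) (pvDiffWitness_solution.2.1) (pvDiffWitness_solution.2.2) ∧ solution (pvDiffWitness_solution.1) (pvDiffWitness_solution.2.1) (pvDiffWitness_solution.2.2) = pvDiffWitnessOut_solution.1 ∧ solution_alt (pvDiffWitness_solution.1) (pvDiffWitness_solution.2.1) (pvDiffWitness_solution.2.2) = pvDiffWitnessOut_solution.2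 ∧ pvDiffWitnessOut_solution.1 ≠ pvDiffWitnessOut_solution.2
def Claim_exact_solution : Prop := ∀ (K : Int) (N : Int) (cables : List Int), Dom_solution K N cables → Pre_solution K N cables → D_solution K N cables → solution K N cables ≠ solution_alt K N cables

-- ===== LEMMAS AND PROOFS =====

-- A's running count equals B's sum of quotients.
lemma pv_cnt_eq (cables : List Int) (x : Int) :
    cables.foldl (fun s c => s + PySem.Int.floordiv c x) 0
      = (cables.map (fun c => PySem.Int.floordiv c x)).sum := by
  simpa using PySem.List.foldl_add (l := cables) (a := 0) (fun c => PySem.Int.floordiv c x)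

-- B's midpoint is A's midpoint.
lemma pv_mid_eq (lo hi : Int) :
    lo + PySem.Int.floordiv (hi - lo) 2 = PySem.Int.floordiv (hi + lo) 2 := by
  rw [PySem.Int.floordiv_eq_ediv_of_pos (by norm_num : (0:Int) < 2),
      PySem.Int.floordiv_eq_ediv_of_pos (by norm_num : (0:Int) < 2)]
  omega

-- Python's // is floor division.
lemma pv_max_eq (cables : List Int) :
    PySem.List.max? cables (fun x => x) = cables.max? := by
  cases cables with
  | nil => rfl
  | cons x t => rw [PySem.List.max?_id_cons]; rfl

lemma pv_foldr_sum (cables : List Int) (d : Int) :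
    cables.foldr (fun c t => Int.fdiv c d + t) 0
      = (cables.map (fun c => PySem.Int.floordiv c d)).sum := by
  induction cables with
  | nil => rfl
  | cons x t ih => simp only [List.foldr_cons, List.map_cons, List.sum_cons, ih]; rfl

-- Both programs follow the same bisection path; A's answer variable is always left-1.
lemma pv_loop_eq : ∀ (n : Nat) (N : Int) (cables : List Int) (lo hi : Int),
    (hi - lo).toNat = n → lo ≤ hi →
    pvLoopA N cables hi lo (lo - 1) = pvGoB N cables lo hi := by
  intro n
  induction n using Nat.strong_induction_on with
  | _ n ih =>
    intro N cables lo hi hn hlh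
    have hfd : PySem.Int.floordiv (hi + lo) 2 = (hi + lo) / 2 :=
      PySem.Int.floordiv_eq_ediv_of_pos (by norm_num)
    rw [pvLoopA.eq_def, pvGoB.eq_def]
    rw [if_neg (by omega : ¬ hi < lo)]
    simp only [pv_mid_eq lo hi, pv_cnt_eq]
    by_cases hc : (cables.map (fun c => PySem.Int.floordiv c (PySem.Int.floordiv (hi + lo) 2))).sum < N
    · rw [if_pos hc, if_neg (by omega : ¬ N ≤ (cables.map (fun c => PySem.Int.floordiv c (PySem.Int.floordiv (hi + lo) 2))).sum)]
      by_cases he : PySem.Int.floordiv (hi + lo) 2 - 1 < lo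
      · rw [if_pos he, pvGoB.eq_def, if_pos he]
      · rw [if_neg he]
        exact ih ((PySem.Int.floordiv (hi + lo) 2 - 1) - lo).toNat (by omega) N cables lo
          (PySem.Int.floordiv (hi + lo) 2 - 1) rfl (by omega)
    · rw [if_neg hc, if_pos (by omega : N ≤ (cables.map (fun c => PySem.Int.floordiv c (PySem.Int.floordiv (hi + lo) 2))).sum)]
      by_cases he : hi < PySem.Int.floordiv (hi + lo) 2 + 1
      · rw [if_pos he, pvGoB.eq_def, if_pos he]
        omega
      · rw [if_neg he]
        have h1 : PySem.Int.floordiv (hi + lo) 2 + 1 - 1 = PySem.Int.floordiv (hi + lo) 2 := by ring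
        have := ih (hi - (PySem.Int.floordiv (hi + lo) 2 + 1)).toNat (by omega) N cables
          (PySem.Int.floordiv (hi + lo) 2 + 1) hi rfl (by omega)
        rw [h1] at this
        exact this

theorem solution_spec : Claim_unchanged_solution := by
  intro K N cables hdom hpre hnd
  obtain ⟨hne, h0, h1⟩ := hpre
  unfold solution solution_alt
  set M := (PySem.List.max? cables (fun x => x)).getD 0 with hMdef
  rcases Int.lt_or_le 0 M with hpos | hneg
  · have := pv_loop_eq (M - 1).toNat N cables 1 M (by omega) (by omega)
    simpa using this
  · have hM2 : M ≤ -2 := by omega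
    have hMx : cables.max?.getD 0 = M := by rw [← pv_max_eq]
    have hS : (cables.map (fun c => PySem.Int.floordiv c (PySem.Int.floordiv (1 + M) 2))).sum < N := by
      by_contra hle
      apply hnd
      refine ⟨by rw [hMx]; exact hM2, ?_⟩
      rw [hMx, pv_foldr_sum]
      exact not_lt.mp hle
    have hcomm : M + 1 = 1 + M := by ring
    have hfd : PySem.Int.floordiv (1 + M) 2 = (1 + M) / 2 :=
      PySem.Int.floordiv_eq_ediv_of_pos (by norm_num)
    rw [pvLoopA.eq_def, pvGoB.eq_def]
    simp only [hcomm, pv_cnt_eq]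
    rw [if_pos hS, if_pos (by omega : PySem.Int.floordiv (1 + M) 2 - 1 < 1),
        if_pos (by omega : M < 1)]
    omega

theorem solution_changed : Claim_changed_solution := by
  unfold Claim_changed_solution
  refine ⟨by decide, by decide, by decide, ?_, ?_, by decide⟩
  · show solution 0 1 [-4] = -2
    rw [solution, pvLoopA.eq_def]
    decide
  · show solution_alt 0 1 [-4] = 0
    rw [solution_alt, pvGoB.eq_def]
    decide

theorem solution_tight : Claim_exact_solution := by
  intro K N cables hdom hpre hd
  obtain ⟨hne, h0, h1⟩ := hpre
  obtain ⟨hM2', hS'⟩ := hd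
  unfold solution solution_alt
  set M := (PySem.List.max? cables (fun x => x)).getD 0 with hMdef
  have hMx : cables.max?.getD 0 = M := by rw [← pv_max_eq]
  have hM2 : M ≤ -2 := by rw [hMx] at hM2'; exact hM2'
  have hS : N ≤ (cables.map (fun c => PySem.Int.floordiv c (PySem.Int.floordiv (1 + M) 2))).sum := by
    rw [hMx, pv_foldr_sum] at hS'
    exact hS'
  have hcomm : M + 1 = 1 + M := by ring
  have hfd : PySem.Int.floordiv (1 + M) 2 = (1 + M) / 2 :=
    PySem.Int.floordiv_eq_ediv_of_pos (by norm_num)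
  rw [pvLoopA.eq_def, pvGoB.eq_def]
  simp only [hcomm, pv_cnt_eq]
  rw [if_neg (not_lt.mpr hS), if_pos (by omega : M < PySem.Int.floordiv (1 + M) 2 + 1),
      if_pos (by omega : M < 1)]
  omega
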